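-- pv_equiv track=rewrite | github.com/sheena005/Tamper-Detection | tamper_detection_project/audio_timeline.py | build_audio_timeline
-- ===== SOURCE A (Python) =====
-- def build_audio_timeline(total_segments, modified_segments):
--
--     timeline = []
--
--     for i in range(total_segments):
--
--         if i in modified_segments:
--             timeline.append((i, "TAMPERED"))
--         else:
--             timeline.append((i, "OK"))
--
--     return timeline
-- ===== SOURCE B (Python) =====
-- def build_audio_timeline(total_segments, modified_segments):
--     timeline = [(i, "OK") for i in range(total_segments)]
--     for seg in modified_segments:
--         if 0 <= seg < total_segments:
--             timeline[seg] = (seg, "TAMPERED")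
--     return timeline
-- ===== Notes on version B (the rewrite author's own statement) =====
-- stated objective: faster
-- what changed: Builds the all-OK timeline in one comprehension and then patches only the (in-range) modified indices in place, instead of testing membership of every segment in modified_segments inside the loop.
import Mathlib
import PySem

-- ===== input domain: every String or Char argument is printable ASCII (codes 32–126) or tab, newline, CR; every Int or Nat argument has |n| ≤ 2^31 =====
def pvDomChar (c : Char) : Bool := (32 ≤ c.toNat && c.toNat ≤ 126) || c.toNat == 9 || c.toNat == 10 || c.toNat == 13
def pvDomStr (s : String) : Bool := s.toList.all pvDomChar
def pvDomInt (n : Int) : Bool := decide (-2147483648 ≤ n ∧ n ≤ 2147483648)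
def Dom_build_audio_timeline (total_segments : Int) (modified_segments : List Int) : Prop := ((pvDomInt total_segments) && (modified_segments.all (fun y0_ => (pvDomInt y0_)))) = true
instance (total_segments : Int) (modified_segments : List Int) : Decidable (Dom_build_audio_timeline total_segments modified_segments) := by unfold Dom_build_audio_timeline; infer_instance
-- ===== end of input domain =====

-- B builds the all-OK timeline first and then patches the in-range modified indices (one pass over each list instead of a membership scan per segment).

-- ===== PORT A =====
def build_audio_timeline (total_segments : Int) (modified_segments : List Int) : List (Int × String) :=
  (PySem.List.pyRange 0 total_segments 1).foldl
    (fun timeline i =>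
      if i ∈ modified_segments then timeline ++ [(i, "TAMPERED")]
      else timeline ++ [(i, "OK")]) []

-- ===== PORT B =====
def build_audio_timeline_alt (total_segments : Int) (modified_segments : List Int) : List (Int × String) :=
  let timeline := (PySem.List.pyRange 0 total_segments 1).map (fun i => (i, "OK"))
  modified_segments.foldl
    (fun timeline seg =>
      if 0 ≤ seg ∧ seg < total_segments then timeline.set seg.toNat (seg, "TAMPERED")
      else timeline) timeline

-- ===== PRECONDITION & SPEC =====
def Spec_build_audio_timeline (total_segments : Int) (modified_segments : List Int) (out : List (Int × String)) : Prop := out = build_audio_timeline_alt total_segments modified_segments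
instance (total_segments : Int) (modified_segments : List Int) (out : List (Int × String)) : Decidable (Spec_build_audio_timeline total_segments modified_segments out) := by unfold Spec_build_audio_timeline; infer_instance

-- ===== CLAIM (what is proved, stated in full; the proofs are below) =====
def Claim_equal_build_audio_timeline : Prop := ∀ (total_segments : Int) (modified_segments : List Int), Dom_build_audio_timeline total_segments modified_segments → Spec_build_audio_timeline total_segments modified_segments (build_audio_timeline total_segments modified_segments)

-- ===== LEMMAS AND PROOFS =====

-- label of index i given a set of (so far processed) modified segments
def pvLab (m : List Int) (i : Int) : Int × String :=
  (i, if i ∈ m then "TAMPERED" else "OK")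

theorem pvA_foldl (m l : List Int) (acc : List (Int × String)) :
    l.foldl (fun timeline i =>
        if i ∈ m then timeline ++ [(i, "TAMPERED")]
        else timeline ++ [(i, "OK")]) acc
      = acc ++ l.map (pvLab m) := by
  induction l generalizing acc with
  | nil => simp
  | cons x xs ih =>
    simp only [List.foldl_cons, List.map_cons]
    by_cases hx : x ∈ m
    · simp [hx, ih, pvLab]
    · simp [hx, ih, pvLab]

theorem pvPatch_step (t seg : Int) (pref : List Int) :
    (if 0 ≤ seg ∧ seg < t then
        ((PySem.List.pyRange 0 t 1).map (pvLab pref)).set seg.toNat (seg, "TAMPERED")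
      else (PySem.List.pyRange 0 t 1).map (pvLab pref))
    = (PySem.List.pyRange 0 t 1).map (pvLab (pref ++ [seg])) := by
  split_ifs with h
  · apply List.ext_getElem
    · simp
    · intro k hk hk'
      simp only [List.length_set, List.length_map, PySem.List.length_pyRange_one] at hk
      simp only [List.getElem_set, List.getElem_map, PySem.List.getElem_pyRange_one]
      by_cases hks : seg.toNat = k
      · have : (0 : Int) + (k : Int) = seg := by omega
        simp [this, pvLab, hks]
      · simp [hks]
        have hne : (k : Int) ≠ seg := by omega
        simp [pvLab, hne]
  · apply List.map_congr_left
    intro i hi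
    rw [PySem.List.mem_pyRange_one] at hi
    have hne : i ≠ seg := by omega
    simp [pvLab, hne]

theorem pvB_foldl (t : Int) (m pref : List Int) :
    m.foldl (fun timeline seg =>
        if 0 ≤ seg ∧ seg < t then timeline.set seg.toNat (seg, "TAMPERED")
        else timeline) ((PySem.List.pyRange 0 t 1).map (pvLab pref))
      = (PySem.List.pyRange 0 t 1).map (pvLab (pref ++ m)) := by
  induction m generalizing pref with
  | nil => simp
  | cons seg rest ih =>
    simp only [List.foldl_cons]
    rw [show (if 0 ≤ seg ∧ seg < t then
          ((PySem.List.pyRange 0 t 1).map (pvLab pref)).set seg.toNat (seg, "TAMPERED")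
        else (PySem.List.pyRange 0 t 1).map (pvLab pref))
        = (PySem.List.pyRange 0 t 1).map (pvLab (pref ++ [seg])) from pvPatch_step t seg pref]
    rw [ih (pref ++ [seg])]
    simp

-- ===== VERDICT (by name: the statement is the Claim_ definition above) =====
theorem build_audio_timeline_spec : Claim_equal_build_audio_timeline := by
  intro t m _
  unfold Spec_build_audio_timeline build_audio_timeline build_audio_timeline_alt
  rw [pvA_foldl]
  have hbase : (PySem.List.pyRange 0 t 1).map (fun i => (i, "OK"))
      = (PySem.List.pyRange 0 t 1).map (pvLab ([] : List Int)) := by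
    simp [pvLab]
  simp only [hbase]
  rw [pvB_foldl t m []]
  simp
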